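-- pv_equiv track=rewrite | github.com/webappmiyawaki/algorithms | id006_007.py | calc_num_list
-- ===== SOURCE A (Python) =====
-- def calc_num_list(max_num:int, num01:int, num02:int) -> list:
--     result_list:list = []
--     for i in range(1, max_num+1, 1):
--         if i % num01 == 0:
--             result_list.append(i)
--         elif i % num02 == 0:
--             result_list.append(i)
--         else:
--             continue
--     return result_list
-- ===== SOURCE B (Python) =====
-- def calc_num_list(max_num: int, num01: int, num02: int) -> list:
--     d1, d2 = abs(num01), abs(num02)
--     xs = list(range(d1, max_num + 1, d1))
--     ys = list(range(d2, max_num + 1, d2))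
--     out = []
--     i = j = 0
--     while i < len(xs) and j < len(ys):
--         x, y = xs[i], ys[j]
--         if x < y:
--             out.append(x)
--             i += 1
--         elif y < x:
--             out.append(y)
--             j += 1
--         else:
--             out.append(x)
--             i += 1
--             j += 1
--     out.extend(xs[i:])
--     out.extend(ys[j:])
--     return out
-- ===== Notes on version B (the rewrite author's own statement) =====
-- stated objective: faster
-- what changed: Instead of scanning every integer 1..max_num and testing divisibility, B generates the multiples of |num01| and of |num02| directly with range steps and merges the two sorted streams with a deduplicating two-pointer merge.
-- outside the precondition, e.g. on calc_num_list(0, 0, 5): A returns [], B raises ValueError; on calc_num_list(5, 1, 0): A returns [1, 2, 3, 4, 5], B raises ValueError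
import Mathlib
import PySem

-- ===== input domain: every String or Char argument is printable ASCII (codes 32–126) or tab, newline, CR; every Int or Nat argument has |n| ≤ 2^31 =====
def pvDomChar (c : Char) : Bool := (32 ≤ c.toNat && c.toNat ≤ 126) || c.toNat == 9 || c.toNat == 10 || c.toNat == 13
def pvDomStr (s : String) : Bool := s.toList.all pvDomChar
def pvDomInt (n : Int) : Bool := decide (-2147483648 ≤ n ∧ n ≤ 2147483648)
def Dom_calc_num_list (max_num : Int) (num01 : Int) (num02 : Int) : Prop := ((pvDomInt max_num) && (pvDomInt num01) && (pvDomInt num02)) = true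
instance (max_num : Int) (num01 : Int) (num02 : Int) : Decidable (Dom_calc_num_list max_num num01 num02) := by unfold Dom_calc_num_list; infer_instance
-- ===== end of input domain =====

-- B replaces A's scan of every integer in 1..max_num by generating the multiples of |num01| and
-- |num02| directly and merging the two sorted streams (deduplicating two-pointer merge): faster.


-- ===== PORT A =====
def calc_num_list (max_num : Int) (num01 : Int) (num02 : Int) : List Int :=
  (PySem.List.pyRange 1 (max_num + 1) 1).foldl
    (fun result_list i =>
      if PySem.Int.mod i num01 = 0 then result_list ++ [i]
      else if PySem.Int.mod i num02 = 0 then result_list ++ [i]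
      else result_list)
    []

-- ===== PORT B =====
-- two-pointer merge of two sorted lists, keeping one copy of equal heads (Source B's while loop;
-- the base cases are Source B's trailing `out.extend(xs[i:]); out.extend(ys[j:])`)
def pvMerge : List Int → List Int → List Int
  | [], ys => ys
  | x :: xs, [] => x :: xs
  | x :: xs, y :: ys =>
    if x < y then x :: pvMerge xs (y :: ys)
    else if y < x then y :: pvMerge (x :: xs) ys
    else x :: pvMerge xs ys
termination_by xs ys => xs.length + ys.length

def calc_num_list_alt (max_num : Int) (num01 : Int) (num02 : Int) : List Int :=
  pvMerge (PySem.List.pyRange |num01| (max_num + 1) |num01|)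
          (PySem.List.pyRange |num02| (max_num + 1) |num02|)

-- ===== PRECONDITION & SPEC =====
-- Pre_ excludes num01 = 0 or num02 = 0: there A raises ZeroDivisionError whenever the corresponding
-- `%` is evaluated, and on the remaining zero-divisor inputs (empty loop, or every i divisible by
-- num01) A returns while B's range(..., 0) raises ValueError.
def Pre_calc_num_list (max_num : Int) (num01 : Int) (num02 : Int) : Prop :=
  num01 ≠ 0 ∧ num02 ≠ 0
instance (max_num : Int) (num01 : Int) (num02 : Int) : Decidable (Pre_calc_num_list max_num num01 num02) := by unfold Pre_calc_num_list; infer_instance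

def pvWitness_calc_num_list : Int × Int × Int := (10, 3, 5)

def Spec_calc_num_list (max_num : Int) (num01 : Int) (num02 : Int) (out : List Int) : Prop := out = calc_num_list_alt max_num num01 num02
instance (max_num : Int) (num01 : Int) (num02 : Int) (out : List Int) : Decidable (Spec_calc_num_list max_num num01 num02 out) := by unfold Spec_calc_num_list; infer_instance

-- ===== CLAIM (what is proved, stated in full; the proofs are below) =====
def Claim_equal_calc_num_list : Prop := ∀ (max_num : Int) (num01 : Int) (num02 : Int), Dom_calc_num_list max_num num01 num02 → Pre_calc_num_list max_num num01 num02 → Spec_calc_num_list max_num num01 num02 (calc_num_list max_num num01 num02)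

-- ===== LEMMAS AND PROOFS =====

-- A's loop is a filter by divisibility
lemma pvLoopA (n1 n2 : Int) (l acc : List Int) :
    l.foldl
      (fun result_list i =>
        if PySem.Int.mod i n1 = 0 then result_list ++ [i]
        else if PySem.Int.mod i n2 = 0 then result_list ++ [i]
        else result_list)
      acc
    = acc ++ l.filter (fun i => decide (n1 ∣ i) || decide (n2 ∣ i)) := by
  induction l generalizing acc with
  | nil => simp
  | cons x t ih =>
    simp only [List.foldl_cons, List.filter_cons]
    rw [ih]
    by_cases h1 : n1 ∣ x <;> by_cases h2 : n2 ∣ x <;>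
      simp [PySem.Int.mod_eq_zero_iff_dvd, h1, h2]

-- two strictly increasing lists with the same members are equal
lemma pvSortedExt (l1 l2 : List Int) (h1 : l1.Pairwise (· < ·)) (h2 : l2.Pairwise (· < ·))
    (hm : ∀ x, x ∈ l1 ↔ x ∈ l2) : l1 = l2 := by
  have hp : l1.Perm l2 := (List.perm_ext_iff_of_nodup (h1.imp ne_of_lt) (h2.imp ne_of_lt)).mpr hm
  exact hp.eq_of_pairwise (fun a b _ _ hab hba => absurd hba (lt_asymm hab)) h1 h2

lemma pvPairwise_pyRange (a b s : Int) (hs : 0 < s) :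
    (PySem.List.pyRange a b s).Pairwise (· < ·) := by
  rw [PySem.List.pyRange_of_pos a b hs]
  exact (List.pairwise_lt_range).map _ (fun i j hij => by
    have : (i : Int) < (j : Int) := by exact_mod_cast hij
    nlinarith)

-- the multiples of d up to m are the filter of 1..m by divisibility by d
lemma pvMultiples_eq_filter (d m : Int) (hd : 0 < d) :
    PySem.List.pyRange d (m + 1) d
      = (PySem.List.pyRange 1 (m + 1) 1).filter (fun x => decide (d ∣ x)) := by
  apply pvSortedExt
  · exact pvPairwise_pyRange _ _ _ hd
  · exact (PySem.List.pairwise_lt_pyRange_one 1 (m + 1)).filter _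
  · intro x
    rw [PySem.List.mem_pyRange_iff_of_pos hd, List.mem_filter]
    rw [PySem.List.mem_pyRange_one]
    have hdvd : d ∣ x - d ↔ d ∣ x := by
      constructor
      · intro h; simpa using dvd_add h (dvd_refl d)
      · intro h; exact dvd_sub h (dvd_refl d)
    simp only [hdvd, decide_eq_true_eq]
    constructor
    · rintro ⟨hle, hlt, hdx⟩; exact ⟨⟨by omega, hlt⟩, hdx⟩
    · rintro ⟨⟨h1, hlt⟩, hdx⟩
      exact ⟨Int.le_of_dvd (by omega) hdx, hlt, hdx⟩

lemma pvMerge_nil_right (l : List Int) : pvMerge l [] = l := by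
  cases l <;> simp [pvMerge]

-- merging the two filters of a strictly increasing list is the filter by the disjunction
lemma pvMerge_filter (p q : Int → Bool) (l : List Int) (h : l.Pairwise (· < ·)) :
    pvMerge (l.filter p) (l.filter q) = l.filter (fun x => p x || q x) := by
  induction l with
  | nil => simp [pvMerge]
  | cons x t ih =>
    have hx : ∀ y ∈ t, x < y := (List.pairwise_cons.mp h).1
    have ht := (List.pairwise_cons.mp h).2
    simp only [List.filter_cons]
    by_cases hp : p x <;> by_cases hq : q x <;> simp only [hp, hq, Bool.false_or,
      Bool.or_false, Bool.or_self, if_true, Bool.false_eq_true, if_false]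
    · -- both heads are x
      simp [pvMerge, ih ht]
    · -- p x, ¬ q x
      cases hfq : t.filter q with
      | nil =>
        rw [pvMerge_nil_right, ← ih ht, hfq, pvMerge_nil_right]
      | cons y ys =>
        have hxy : x < y := hx y (List.mem_of_mem_filter (hfq ▸ List.mem_cons_self))
        rw [show pvMerge (x :: t.filter p) (y :: ys) = x :: pvMerge (t.filter p) (y :: ys) by
              simp [pvMerge, hxy]]
        rw [← hfq, ih ht]
    · -- ¬ p x, q x
      cases hfp : t.filter p with
      | nil =>
        simp only [pvMerge, ← ih ht, hfp]
      | cons y ys =>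
        have hxy : x < y := hx y (List.mem_of_mem_filter (hfp ▸ List.mem_cons_self))
        rw [show pvMerge (y :: ys) (x :: t.filter q) = x :: pvMerge (y :: ys) (t.filter q) by
              simp [pvMerge, hxy, not_lt_of_gt hxy]]
        rw [← hfp, ih ht]
    · exact ih ht

-- ===== VERDICT (by name: the statement is the Claim_ definition above) =====
theorem calc_num_list_spec : Claim_equal_calc_num_list := by
  intro m n1 n2 _ hpre
  obtain ⟨h1, h2⟩ := hpre
  unfold Spec_calc_num_list calc_num_list calc_num_list_alt
  rw [pvLoopA, List.nil_append]
  rw [pvMultiples_eq_filter _ _ (abs_pos.mpr h1), pvMultiples_eq_filter _ _ (abs_pos.mpr h2)]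
  rw [pvMerge_filter _ _ _ (PySem.List.pairwise_lt_pyRange_one 1 (m + 1))]
  simp only [abs_dvd]
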